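-- pv_equiv track=rewrite | github.com/sakai-nako/Fork_SffCharaViewer | src/sff_parser.py | reverse_act_palette
-- ===== SOURCE A (Python) =====
-- def reverse_act_palette(palette):
--     """ACTパレットを反転させる関数（SFFv1専用）"""
--     if len(palette) < 768:
--         return palette
--     reversed_palette = []
--     for i in range(255, -1, -1):
--         idx = i * 3
--         if idx + 2 < len(palette):
--             # BGR → RGB変換を行う（SFFv1のACTパレット用）
--             b = palette[idx]
--             g = palette[idx + 1]
--             r = palette[idx + 2]
--             reversed_palette.extend([r, g, b])  # RGB順に並び替え
--         else:
--             reversed_palette.extend([0, 0, 0])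
--     return reversed_palette
-- ===== SOURCE B (Python) =====
-- def reverse_act_palette(palette):
--     """ACT palette flip: reversing 256 BGR triples while swapping B and R
--     is exactly a full reversal of the first 768 bytes."""
--     if len(palette) < 768:
--         return palette
--     return list(reversed(palette[:768]))
-- ===== Notes on version B (the rewrite author's own statement) =====
-- stated objective: simpler
-- what changed: Replaces the descending per-triple loop with its bounds check and channel unpacking by a single closed-form reversal of the 768-byte prefix (reversing the triples while swapping B and R within each triple is a plain byte reversal).
import Mathlib
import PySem

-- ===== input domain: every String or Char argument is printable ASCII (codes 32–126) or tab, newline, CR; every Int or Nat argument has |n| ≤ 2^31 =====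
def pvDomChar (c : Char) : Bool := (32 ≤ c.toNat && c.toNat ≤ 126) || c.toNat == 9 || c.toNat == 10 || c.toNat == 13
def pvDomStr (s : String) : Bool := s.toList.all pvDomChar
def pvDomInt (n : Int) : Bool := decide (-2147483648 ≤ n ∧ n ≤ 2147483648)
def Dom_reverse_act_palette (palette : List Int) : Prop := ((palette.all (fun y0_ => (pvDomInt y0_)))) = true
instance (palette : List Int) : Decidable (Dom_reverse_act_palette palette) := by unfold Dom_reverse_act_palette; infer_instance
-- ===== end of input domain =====

-- B replaces the per-triple descending loop by one closed-form reversal of the 768-byte prefix (simpler).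

-- ===== PORT A =====
def reverse_act_palette (palette : List Int) : List Int :=
  if (palette.length : Int) < 768 then palette
  else
    (PySem.List.pyRange 255 (-1) (-1)).foldl
      (fun acc i =>
        let idx := i * 3
        if idx + 2 < (palette.length : Int) then
          -- indices are in range in this branch, so pyGetD matches Python's palette[idx…]
          acc ++ [PySem.List.pyGetD palette (idx + 2) 0,
                  PySem.List.pyGetD palette (idx + 1) 0,
                  PySem.List.pyGetD palette idx 0]
        else acc ++ [0, 0, 0]) []

-- ===== PORT B =====
def reverse_act_palette_alt (palette : List Int) : List Int :=
  if (palette.length : Int) < 768 then palette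
  else (PySem.List.slice palette none (some 768)).reverse

-- ===== PRECONDITION & SPEC =====
def Spec_reverse_act_palette (palette : List Int) (out : List Int) : Prop := out = reverse_act_palette_alt palette
instance (palette : List Int) (out : List Int) : Decidable (Spec_reverse_act_palette palette out) := by unfold Spec_reverse_act_palette; infer_instance

-- ===== CLAIM (what is proved, stated in full; the proofs are below) =====
def Claim_equal_reverse_act_palette : Prop := ∀ (palette : List Int), Dom_reverse_act_palette palette → Spec_reverse_act_palette palette (reverse_act_palette palette)

-- ===== LEMMAS AND PROOFS =====

-- The descending loop over triples n-1 … 0 produces the reversal of the first 3*n bytes.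
lemma reverse_act_palette_loop (palette : List Int) (n : Nat) (hn : 3 * n ≤ palette.length)
    (acc : List Int) :
    (PySem.List.pyRange ((n : Int) - 1) (-1) (-1)).foldl
      (fun acc i =>
        let idx := i * 3
        if idx + 2 < (palette.length : Int) then
          acc ++ [PySem.List.pyGetD palette (idx + 2) 0,
                  PySem.List.pyGetD palette (idx + 1) 0,
                  PySem.List.pyGetD palette idx 0]
        else acc ++ [0, 0, 0]) acc
    = acc ++ (palette.take (3 * n)).reverse := by
  induction n generalizing acc with
  | zero =>
    rw [PySem.List.pyRange_neg_one_eq_nil (by norm_num)]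
    simp
  | succ n ih =>
    have hlt : 3 * n + 2 < palette.length := by omega
    have hcast : ((n + 1 : Nat) : Int) - 1 = (n : Int) := by push_cast; ring
    rw [hcast, PySem.List.pyRange_neg_one_cons (by omega : (-1:Int) < (n:Int))]
    rw [List.foldl_cons]
    have hif : ((n : Int) * 3 + 2 < (palette.length : Int)) := by
      omega
    simp only [if_pos hif]
    have g2 : (n : Int) * 3 + 2 = ((3 * n + 2 : Nat) : Int) := by push_cast; ring
    have g1 : (n : Int) * 3 + 1 = ((3 * n + 1 : Nat) : Int) := by push_cast; ring
    have g0 : (n : Int) * 3 = ((3 * n : Nat) : Int) := by push_cast; ring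
    rw [g2, g1, g0, PySem.List.pyGetD_natCast, PySem.List.pyGetD_natCast,
        PySem.List.pyGetD_natCast]
    rw [ih (by omega)]
    have htake : palette.take (3 * (n + 1))
        = palette.take (3 * n) ++ [palette[3 * n], palette[3 * n + 1], palette[3 * n + 2]] := by
      have : 3 * (n + 1) = 3 * n + 3 := by ring
      rw [this, List.take_add]
      congr 1
      rw [List.drop_eq_getElem_cons (by omega), List.take_succ_cons,
          List.drop_eq_getElem_cons (by omega), List.take_succ_cons,
          List.drop_eq_getElem_cons (by omega), List.take_succ_cons, List.take_zero]
    rw [htake]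
    simp [List.getElem?_eq_getElem hlt,
          List.getElem?_eq_getElem (show 3 * n + 1 < palette.length by omega),
          List.getElem?_eq_getElem (show 3 * n < palette.length by omega)]

-- ===== VERDICT (by name: the statement is the Claim_ definition above) =====
theorem reverse_act_palette_spec : Claim_equal_reverse_act_palette := by
  intro palette _
  unfold Spec_reverse_act_palette reverse_act_palette reverse_act_palette_alt
  split_ifs with h
  · rfl
  · have hlen : 768 ≤ palette.length := by exact_mod_cast not_lt.mp h
    have h255 : (255 : Int) = ((256 : Nat) : Int) - 1 := by norm_num
    rw [h255, reverse_act_palette_loop palette 256 (by omega),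
        PySem.List.slice_to palette (by norm_num)]
    simp
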